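-- pv_equiv track=rewrite | github.com/PasupuletiSindhu/Evidence-Bound-Ontology-State-Engine-for-Clinical-Text | baselines/models/bert_ner.py | _bio_labels
-- ===== SOURCE A (Python) =====
-- from typing import List, Dict, Any, Optional, Tuple
--
-- def _normalize_entity_tag(raw: str) -> str:
--     """Single label for BIO: take first semantic type if comma-separated (MedMentions)."""
--     if not raw or raw == "O":
--         return ""
--     tag = (raw.strip().split(",")[0] or "").strip()[:30]
--     return tag if tag else ""
--
-- def _resolve_tag(raw: str, semantic_group_map: Optional[Dict[str, str]]) -> str:
--     tag = _normalize_entity_tag(raw)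
--     if not tag:
--         return ""
--     if semantic_group_map is not None:
--         tag = semantic_group_map.get(tag, "OTHER")
--     return tag
--
-- ENTITY_ONLY_LABEL_LIST = ["B-ENTITY", "I-ENTITY", "O"]
--
-- def _bio_labels(
--     examples: List[Dict],
--     label_key: str = "semantic_type",
--     semantic_group_map: Optional[Dict[str, str]] = None,
--     collapse_to_entity: bool = False,
-- ) -> List[str]:
--     if collapse_to_entity:
--         return list(ENTITY_ONLY_LABEL_LIST)
--     labels = set()
--     for ex in examples:
--         for e in ex.get("entities", []):
--             raw = e.get(label_key) or e.get("type") or ""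
--             tag = _resolve_tag(raw, semantic_group_map)
--             if tag:
--                 labels.add(f"B-{tag}")
--                 labels.add(f"I-{tag}")
--     labels.discard("B-O")
--     labels.discard("I-O")
--     return sorted(labels) + ["O"]
-- ===== SOURCE B (Python) =====
-- from typing import List, Dict, Optional
--
-- def _tag_of(raw: str, semantic_group_map: Optional[Dict[str, str]]) -> str:
--     """Combined normalize+resolve in one step."""
--     if not raw or raw == "O":
--         return ""
--     t = raw.strip().split(",")[0].strip()[:30]
--     if not t:
--         return ""
--     return semantic_group_map.get(t, "OTHER") if semantic_group_map is not None else t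
--
-- def _bio_labels(
--     examples: List[Dict],
--     label_key: str = "semantic_type",
--     semantic_group_map: Optional[Dict[str, str]] = None,
--     collapse_to_entity: bool = False,
-- ) -> List[str]:
--     if collapse_to_entity:
--         return ["B-ENTITY", "I-ENTITY", "O"]
--     # staged passes: flatten entities, extract raws, resolve, dedupe once
--     entities = [e for ex in examples for e in ex.get("entities", [])]
--     raws = [e.get(label_key) or e.get("type") or "" for e in entities]
--     tags = set(_tag_of(r, semantic_group_map) for r in raws)
--     ordered = sorted(t for t in tags if t and t != "O")
--     # "B" < "I", so projecting the sorted bare tags yields the sorted label list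
--     return ["B-" + t for t in ordered] + ["I-" + t for t in ordered] + ["O"]
-- ===== Notes on version B (the rewrite author's own statement) =====
-- stated objective: alternative
-- what changed: B replaces A's nested accumulator loops over a set of prefixed labels (with B-O/I-O discards) by staged passes: flatten all entities, map to raw strings, resolve each with one combined normalize+resolve helper, dedupe once with set(), filter out empty and "O", sort the bare tags once, and project the sorted tags into B-/I- forms (correct because "B" < "I").
import Mathlib
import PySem

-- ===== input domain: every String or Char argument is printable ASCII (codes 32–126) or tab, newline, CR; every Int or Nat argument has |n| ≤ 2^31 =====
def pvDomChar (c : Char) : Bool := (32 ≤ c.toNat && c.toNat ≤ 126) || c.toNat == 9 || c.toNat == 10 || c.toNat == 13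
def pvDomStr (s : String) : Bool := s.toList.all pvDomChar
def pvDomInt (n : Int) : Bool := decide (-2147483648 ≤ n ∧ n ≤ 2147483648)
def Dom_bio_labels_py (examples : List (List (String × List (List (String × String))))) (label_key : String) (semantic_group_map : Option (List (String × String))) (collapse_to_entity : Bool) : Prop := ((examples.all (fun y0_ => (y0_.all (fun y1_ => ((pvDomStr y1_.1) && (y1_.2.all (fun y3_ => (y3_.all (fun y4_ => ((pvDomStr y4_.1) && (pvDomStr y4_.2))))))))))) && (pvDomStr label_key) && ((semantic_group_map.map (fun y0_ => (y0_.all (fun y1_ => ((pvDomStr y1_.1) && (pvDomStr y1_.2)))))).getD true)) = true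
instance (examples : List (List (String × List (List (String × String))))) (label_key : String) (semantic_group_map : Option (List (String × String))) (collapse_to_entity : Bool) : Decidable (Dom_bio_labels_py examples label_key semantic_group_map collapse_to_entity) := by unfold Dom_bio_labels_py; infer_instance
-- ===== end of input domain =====

-- ===== PORT A =====
-- B resolves tags in one combined helper, flattens/maps/dedupes in staged passes and projects
-- the sorted bare tags into B-/I- labels, instead of A's nested accumulator loops over a set of
-- prefixed labels with B-O/I-O discards (objective: alternative, same cost).

-- A's helper _normalize_entity_tag
def normalize_entity_tag_py (raw : String) : String :=
  if raw = "" ∨ raw = "O" then ""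
  else
    -- raw.strip().split(",")[0]: split? with the literal non-empty separator "," is always `some`
    let first := PySem.List.pyGetD ((PySem.Str.split? (PySem.Str.strip raw) ",").getD []) 0 ""
    let tag := PySem.Str.slice (PySem.Str.strip (if first = "" then "" else first)) none (some 30)
    if tag = "" then "" else tag

-- A's helper _resolve_tag
def resolve_tag_py (raw : String) (semantic_group_map : Option (List (String × String))) : String :=
  let tag := normalize_entity_tag_py raw
  if tag = "" then ""
  else
    match semantic_group_map with
    | none => tag
    | some m => PySem.Dict.getD (PySem.Dict.mk m) tag "OTHER"

def bio_labels_py (examples : List (List (String × List (List (String × String))))) (label_key : String) (semantic_group_map : Option (List (String × String))) (collapse_to_entity : Bool) : List String :=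
  if collapse_to_entity then ["B-ENTITY", "I-ENTITY", "O"]
  else
    let labels : PySem.Set String := examples.foldl (fun labels ex =>
      (PySem.Dict.getD (PySem.Dict.mk ex) "entities" []).foldl (fun labels e =>
        let a := (PySem.Dict.get? (PySem.Dict.mk e) label_key).getD ""
        let raw := if a ≠ "" then a else
          let b := (PySem.Dict.get? (PySem.Dict.mk e) "type").getD ""
          if b ≠ "" then b else ""
        let tag := resolve_tag_py raw semantic_group_map
        if tag ≠ "" then (labels.add ("B-" ++ tag)).add ("I-" ++ tag) else labels) labels) []
    let labels := (labels.discard "B-O").discard "I-O"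
    PySem.List.sorted labels (fun s => s) ++ ["O"]

-- ===== PORT B =====
-- B's helper _tag_of (combined normalize+resolve)
def tag_of_py (raw : String) (semantic_group_map : Option (List (String × String))) : String :=
  if raw = "" ∨ raw = "O" then ""
  else
    let t := PySem.Str.slice (PySem.Str.strip (PySem.List.pyGetD ((PySem.Str.split? (PySem.Str.strip raw) ",").getD []) 0 "")) none (some 30)
    if t = "" then ""
    else
      match semantic_group_map with
      | some m => PySem.Dict.getD (PySem.Dict.mk m) t "OTHER"
      | none => t

def bio_labels_py_alt (examples : List (List (String × List (List (String × String))))) (label_key : String) (semantic_group_map : Option (List (String × String))) (collapse_to_entity : Bool) : List String :=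
  if collapse_to_entity then ["B-ENTITY", "I-ENTITY", "O"]
  else
    let entities := examples.flatMap (fun ex => PySem.Dict.getD (PySem.Dict.mk ex) "entities" [])
    let raws := entities.map (fun e =>
      let a := (PySem.Dict.get? (PySem.Dict.mk e) label_key).getD ""
      if a ≠ "" then a else (PySem.Dict.get? (PySem.Dict.mk e) "type").getD "")
    let tags : PySem.Set String := PySem.Set.ofList (raws.map (fun r => tag_of_py r semantic_group_map))
    let ordered := PySem.List.sorted (tags.filter (fun t => decide (t ≠ "" ∧ t ≠ "O"))) (fun s => s)
    ordered.map (fun t => "B-" ++ t) ++ ordered.map (fun t => "I-" ++ t) ++ ["O"]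

-- ===== PRECONDITION & SPEC =====
def Spec_bio_labels_py (examples : List (List (String × List (List (String × String))))) (label_key : String) (semantic_group_map : Option (List (String × String))) (collapse_to_entity : Bool) (out : List String) : Prop := out = bio_labels_py_alt examples label_key semantic_group_map collapse_to_entity
instance (examples : List (List (String × List (List (String × String))))) (label_key : String) (semantic_group_map : Option (List (String × String))) (collapse_to_entity : Bool) (out : List String) : Decidable (Spec_bio_labels_py examples label_key semantic_group_map collapse_to_entity out) := by unfold Spec_bio_labels_py; infer_instance

-- ===== CLAIM (what is proved, stated in full; the proofs are below) =====
def Claim_equal_bio_labels_py : Prop := ∀ (examples : List (List (String × List (List (String × String))))) (label_key : String) (semantic_group_map : Option (List (String × String))) (collapse_to_entity : Bool), Dom_bio_labels_py examples label_key semantic_group_map collapse_to_entity → Spec_bio_labels_py examples label_key semantic_group_map collapse_to_entity (bio_labels_py examples label_key semantic_group_map collapse_to_entity)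

-- ===== LEMMAS AND PROOFS =====

-- the two BIO labels a bare tag generates in A
def pvPairF (t : String) : List String := ["B-" ++ t, "I-" ++ t]

theorem pv_B_ne_I (s t : String) : "B-" ++ s ≠ "I-" ++ t := by
  intro h
  have h2 := congrArg String.toList h
  simp [String.toList_append] at h2

theorem pv_mem_flatMap_pairF (x : String) (ts : List String) :
    x ∈ ts.flatMap pvPairF ↔ ∃ t ∈ ts, x = "B-" ++ t ∨ x = "I-" ++ t := by
  constructor
  · intro h
    rcases List.mem_flatMap.1 h with ⟨t, ht, hx⟩
    refine ⟨t, ht, ?_⟩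
    simp only [pvPairF, List.mem_cons, List.not_mem_nil, or_false] at hx
    exact hx
  · rintro ⟨t, ht, h | h⟩
    · exact List.mem_flatMap.2 ⟨t, ht, h ▸ List.mem_cons_self⟩
    · exact List.mem_flatMap.2 ⟨t, ht, h ▸ List.mem_cons_of_mem _ List.mem_cons_self⟩

-- A's loop body on one extracted tag
def pvStepA (L : PySem.Set String) (t : String) : PySem.Set String :=
  if t ≠ "" then (L.add ("B-" ++ t)).add ("I-" ++ t) else L

-- A's per-entity tag extraction (exactly the body of A's inner loop)
def pvTagA (e : List (String × String)) (label_key : String) (semantic_group_map : Option (List (String × String))) : String :=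
  let a := (PySem.Dict.get? (PySem.Dict.mk e) label_key).getD ""
  let raw := if a ≠ "" then a else
    let b := (PySem.Dict.get? (PySem.Dict.mk e) "type").getD ""
    if b ≠ "" then b else ""
  resolve_tag_py raw semantic_group_map

-- the flat stream of extracted tags
def pvTagStream (examples : List (List (String × List (List (String × String))))) (label_key : String) (semantic_group_map : Option (List (String × String))) : List String :=
  examples.flatMap (fun ex => (PySem.Dict.getD (PySem.Dict.mk ex) "entities" []).map (fun e => pvTagA e label_key semantic_group_map))

theorem pv_foldA_eq (examples : List (List (String × List (List (String × String))))) (label_key : String) (semantic_group_map : Option (List (String × String))) (L0 : PySem.Set String) :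
    examples.foldl (fun labels ex =>
      (PySem.Dict.getD (PySem.Dict.mk ex) "entities" []).foldl (fun labels e =>
        let a := (PySem.Dict.get? (PySem.Dict.mk e) label_key).getD ""
        let raw := if a ≠ "" then a else
          let b := (PySem.Dict.get? (PySem.Dict.mk e) "type").getD ""
          if b ≠ "" then b else ""
        let tag := resolve_tag_py raw semantic_group_map
        if tag ≠ "" then (labels.add ("B-" ++ tag)).add ("I-" ++ tag) else labels) labels) L0
    = (pvTagStream examples label_key semantic_group_map).foldl pvStepA L0 := by
  induction examples generalizing L0 with
  | nil => rfl
  | cons ex rest ih =>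
    simp only [List.foldl_cons, pvTagStream, List.flatMap_cons, List.foldl_append, List.foldl_map]
    rw [ih]
    rfl

-- B's combined helper computes exactly A's two-stage resolution
theorem pv_if_id (s : String) : (if s = "" then "" else s) = s := by
  by_cases h : s = "" <;> simp [h]

theorem pv_tag_eq (raw : String) (m : Option (List (String × String))) :
    tag_of_py raw m = resolve_tag_py raw m := by
  unfold tag_of_py resolve_tag_py normalize_entity_tag_py
  by_cases h0 : raw = "" ∨ raw = "O"
  · simp [h0]
  · simp only [if_neg h0, pv_if_id]
    cases m <;> rfl

-- B's per-entity extraction equals A's (A has a redundant inner `or ""`)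
theorem pv_tagB_eq (e : List (String × String)) (label_key : String) (m : Option (List (String × String))) :
    tag_of_py (let a := (PySem.Dict.get? (PySem.Dict.mk e) label_key).getD ""
               if a ≠ "" then a else (PySem.Dict.get? (PySem.Dict.mk e) "type").getD "") m
      = pvTagA e label_key m := by
  rw [pv_tag_eq]
  unfold pvTagA
  by_cases hb : (PySem.Dict.get? (PySem.Dict.mk e) "type").getD "" = "" <;> simp [hb]

-- B's staged tag list is the same stream
theorem pv_stream_eq (examples : List (List (String × List (List (String × String))))) (label_key : String) (m : Option (List (String × String))) :
    ((examples.flatMap (fun ex => PySem.Dict.getD (PySem.Dict.mk ex) "entities" [])).map (fun e =>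
        let a := (PySem.Dict.get? (PySem.Dict.mk e) label_key).getD ""
        if a ≠ "" then a else (PySem.Dict.get? (PySem.Dict.mk e) "type").getD "")).map
      (fun r => tag_of_py r m)
    = pvTagStream examples label_key m := by
  rw [List.map_map, List.map_flatMap, pvTagStream]
  refine congrFun (congrArg List.flatMap (funext fun ex => ?_)) examples
  exact List.map_congr_left (fun e _ => pv_tagB_eq e label_key m)

-- joint invariant: A's label set is the pair-projection of the nonempty part of the
-- running Set.add accumulation
theorem pv_invA (str : List String) : ∀ (ts : List String), ts.Nodup →
    str.foldl pvStepA ((ts.filter (fun s => decide (s ≠ ""))).flatMap pvPairF)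
      = (((str.foldl PySem.Set.add ts).filter (fun s => decide (s ≠ ""))).flatMap pvPairF) := by
  induction str with
  | nil => intro ts _; rfl
  | cons t rest ih =>
    intro ts hN
    rw [List.foldl_cons, List.foldl_cons]
    by_cases hmem : t ∈ ts
    · have hSA : PySem.Set.add ts t = ts := PySem.Set.add_of_mem hmem
      by_cases ht : t = ""
      · have hA : pvStepA ((ts.filter (fun s => decide (s ≠ ""))).flatMap pvPairF) t
            = (ts.filter (fun s => decide (s ≠ ""))).flatMap pvPairF := by
          simp [pvStepA, ht]
        rw [hA, hSA]; exact ih ts hN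
      · have htf : t ∈ ts.filter (fun s => decide (s ≠ "")) :=
          List.mem_filter.2 ⟨hmem, by simp [ht]⟩
        have hBmem : ("B-" ++ t) ∈ (ts.filter (fun s => decide (s ≠ ""))).flatMap pvPairF :=
          (pv_mem_flatMap_pairF _ _).2 ⟨t, htf, Or.inl rfl⟩
        have hImem : ("I-" ++ t) ∈ (ts.filter (fun s => decide (s ≠ ""))).flatMap pvPairF :=
          (pv_mem_flatMap_pairF _ _).2 ⟨t, htf, Or.inr rfl⟩
        have hA : pvStepA ((ts.filter (fun s => decide (s ≠ ""))).flatMap pvPairF) t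
            = (ts.filter (fun s => decide (s ≠ ""))).flatMap pvPairF := by
          rw [pvStepA, if_pos ht, PySem.Set.add_of_mem hBmem, PySem.Set.add_of_mem hImem]
        rw [hA, hSA]; exact ih ts hN
    · have hSA : PySem.Set.add ts t = ts ++ [t] := PySem.Set.add_of_not_mem hmem
      have hnodup : (ts ++ [t]).Nodup := by
        simp [List.nodup_append, hN]
        exact fun a ha h => hmem (h ▸ ha)
      by_cases ht : t = ""
      · have hA : pvStepA ((ts.filter (fun s => decide (s ≠ ""))).flatMap pvPairF) t
            = (ts.filter (fun s => decide (s ≠ ""))).flatMap pvPairF := by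
          simp [pvStepA, ht]
        have hfl : (ts ++ [t]).filter (fun s => decide (s ≠ "")) = ts.filter (fun s => decide (s ≠ "")) := by
          simp [List.filter_append, ht]
        rw [hA, hSA, ← hfl] at *
        rw [hfl]
        have := ih (ts ++ [t]) hnodup
        rw [hfl] at this
        exact this
      · have hBnot : ("B-" ++ t) ∉ (ts.filter (fun s => decide (s ≠ ""))).flatMap pvPairF := by
          intro h
          rcases (pv_mem_flatMap_pairF _ _).1 h with ⟨s, hs, hcase | hcase⟩
          · exact hmem ((((String.append_right_inj "B-").mp hcase.symm)) ▸ (List.mem_filter.1 hs).1)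
          · exact pv_B_ne_I t s hcase
        have hInot : ("I-" ++ t) ∉ ((ts.filter (fun s => decide (s ≠ ""))).flatMap pvPairF ++ ["B-" ++ t]) := by
          intro h
          rcases List.mem_append.1 h with h | h
          · rcases (pv_mem_flatMap_pairF _ _).1 h with ⟨s, hs, hcase | hcase⟩
            · exact pv_B_ne_I s t hcase.symm
            · exact hmem ((((String.append_right_inj "I-").mp hcase.symm)) ▸ (List.mem_filter.1 hs).1)
          · exact pv_B_ne_I t t (List.mem_singleton.1 h).symm
        have hA : pvStepA ((ts.filter (fun s => decide (s ≠ ""))).flatMap pvPairF) t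
            = ((ts ++ [t]).filter (fun s => decide (s ≠ ""))).flatMap pvPairF := by
          rw [pvStepA, if_pos ht, PySem.Set.add_of_not_mem hBnot, PySem.Set.add_of_not_mem hInot]
          simp [List.filter_append, ht, pvPairF]
        rw [hA, hSA]
        exact ih (ts ++ [t]) hnodup

-- the two discards erase exactly the pair generated by "O"
theorem pv_discard_eq (ts : List String) :
    (PySem.Set.discard (PySem.Set.discard (ts.flatMap pvPairF) "B-O") "I-O")
      = (ts.filter (fun s => decide (s ≠ "O"))).flatMap pvPairF := by
  induction ts with
  | nil => rfl
  | cons t rest ih =>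
    simp only [List.flatMap_cons, PySem.Set.discard, List.filter_append] at ih ⊢
    rw [List.filter_cons]
    by_cases hO : t = "O"
    · subst hO; simpa [pvPairF] using ih
    · have h1 : "B-" ++ t ≠ "B-O" := fun h => hO ((String.append_right_inj "B-").mp h)
      have h2 : "I-" ++ t ≠ "I-O" := fun h => hO ((String.append_right_inj "I-").mp h)
      have h3 : "B-" ++ t ≠ "I-O" := pv_B_ne_I t "O"
      have h4 : "I-" ++ t ≠ "B-O" := fun h => pv_B_ne_I "O" t h.symm
      simp only [if_pos (by simp [hO] : (fun s => decide (s ≠ "O")) t = true)]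
      simp [pvPairF, h1, h2, h3, h4]
      simpa [pvPairF] using ih

theorem pv_lt_B_B (s t : String) : ("B-" ++ s < "B-" ++ t) ↔ s < t := by
  rw [String.lt_iff_toList_lt, String.lt_iff_toList_lt]
  simp only [String.toList_append]
  show ('B' :: '-' :: s.toList < 'B' :: '-' :: t.toList) ↔ _
  rw [List.cons_lt_cons_self, List.cons_lt_cons_self]

theorem pv_lt_prefix (s t : String) : "B-" ++ s < "I-" ++ t := by
  rw [String.lt_iff_toList_lt]
  simp only [String.toList_append]
  exact List.Lex.rel (by decide)

theorem pv_perm_flatMap (ts : List String) :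
    (ts.map (fun t => "B-" ++ t) ++ ts.map (fun t => "I-" ++ t)).Perm (ts.flatMap pvPairF) := by
  induction ts with
  | nil => rfl
  | cons t rest ih =>
    simp only [List.map_cons, List.flatMap_cons, pvPairF, List.cons_append]
    exact (List.perm_middle.cons _).trans ((ih.cons _).cons _)

-- sorting the doubled label set = projecting the sorted bare tags
theorem pv_sorted_eq (T : List String) (hN : T.Nodup) :
    PySem.List.sorted (T.flatMap pvPairF) (fun s => s)
      = (PySem.List.sorted T (fun s => s)).map (fun t => "B-" ++ t)
        ++ (PySem.List.sorted T (fun s => s)).map (fun t => "I-" ++ t) := by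
  have hperm : (PySem.List.sorted T (fun s => s)).Perm T := PySem.List.sorted_perm T _ false
  have huN : (PySem.List.sorted T (fun s => s)).Nodup := (hperm.nodup_iff).2 hN
  have hle : (PySem.List.sorted T (fun s => s)).Pairwise (fun a b => a ≤ b) :=
    PySem.List.sorted_pairwise T _
  have hlt : (PySem.List.sorted T (fun s => s)).Pairwise (fun a b => a < b) :=
    (hle.and huN).imp (fun h => lt_of_le_of_ne h.1 h.2)
  apply PySem.List.sorted_eq_of_perm_of_pairwise_lt
  · exact ((hperm.map _).append (hperm.map _)).trans (pv_perm_flatMap T)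
  · rw [List.pairwise_append]
    refine ⟨(List.pairwise_map).2 (hlt.imp fun h => (pv_lt_B_B _ _).2 h),
            (List.pairwise_map).2 (hlt.imp fun h => by
              rw [String.lt_iff_toList_lt] at h ⊢
              simpa [String.toList_append] using h), ?_⟩
    intro a ha b hb
    rcases List.mem_map.1 ha with ⟨s, _, rfl⟩
    rcases List.mem_map.1 hb with ⟨u, _, rfl⟩
    exact pv_lt_prefix s u

-- ===== VERDICT (by name: the statement is the Claim_ definition above) =====
theorem bio_labels_py_spec : Claim_equal_bio_labels_py := by
  unfold Claim_equal_bio_labels_py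
  intro examples label_key sgm collapse _
  unfold Spec_bio_labels_py bio_labels_py bio_labels_py_alt
  cases collapse with
  | true => rfl
  | false =>
    simp only [Bool.false_eq_true, if_false]
    rw [pv_foldA_eq, pv_stream_eq]
    have hfold := pv_invA (pvTagStream examples label_key sgm) [] (by simp)
    simp only [List.filter_nil, List.flatMap_nil] at hfold
    rw [hfold, pv_discard_eq, List.filter_filter]
    have hpred : (fun s => decide (s ≠ "O") && decide (s ≠ "")) = (fun t => decide (t ≠ "" ∧ t ≠ "O")) := by
      funext s; by_cases h1 : s = "" <;> by_cases h2 : s = "O" <;> simp [h1, h2]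
    rw [hpred]
    have hN : ((pvTagStream examples label_key sgm).foldl PySem.Set.add ([] : List String)).Nodup := by
      have : (pvTagStream examples label_key sgm).foldl PySem.Set.add ([] : List String)
          = PySem.Set.ofList (pvTagStream examples label_key sgm) := by
        rw [PySem.Set.ofList_eq_foldl]
      rw [this]
      exact PySem.Set.nodup_ofList _
    rw [PySem.Set.ofList_eq_foldl]
    rw [pv_sorted_eq _ (hN.filter _), List.append_assoc]
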